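-- pv_equiv track=rewrite | github.com/JoonyeolDev/codingtest | lv2/유사_칸토어_비트열.py | cantor
-- ===== SOURCE A (Python) =====
-- def cantor(n):
--     s = '1'
--     count = 0
--     while count<n:
--         answer = ''
--         for i in s:
--             if i=='1':
--                 answer+='11011'
--             else:
--                 answer+='00000'
--         s = answer
--         count+=1
--     return s
--
-- answer = []
-- ===== SOURCE B (Python) =====
-- def cantor(n):
--     if n <= 0:
--         return '1'
--     p = cantor(n - 1)
--     return p + p + '0' * 5 ** (n - 1) + p + p
-- ===== Notes on version B (the rewrite author's own statement) =====
-- stated objective: alternative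
-- what changed: Replaces the iterated left-to-right character-by-character expansion of the whole string with a self-similar divide-and-conquer recursion: cantor(n) is built from four copies of cantor(n-1) around a single zero block of length 5^(n-1).
import Mathlib
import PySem

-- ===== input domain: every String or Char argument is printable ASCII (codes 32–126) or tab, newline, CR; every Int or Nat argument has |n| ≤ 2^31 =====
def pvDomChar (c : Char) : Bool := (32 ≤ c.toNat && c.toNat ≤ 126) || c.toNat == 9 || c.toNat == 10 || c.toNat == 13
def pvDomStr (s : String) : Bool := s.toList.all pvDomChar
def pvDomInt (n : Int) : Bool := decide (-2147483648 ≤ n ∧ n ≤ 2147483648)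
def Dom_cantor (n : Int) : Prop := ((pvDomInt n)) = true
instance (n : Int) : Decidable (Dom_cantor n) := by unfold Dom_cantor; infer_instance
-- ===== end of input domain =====

-- B replaces the iterated whole-string expansion with a self-similar recursion
-- (four copies of cantor(n-1) around a 5^(n-1) zero block); objective: alternative.

-- ===== PORT A =====
-- strings are ported as List Char (exact for the '1'/'0' alphabet here)
-- inner for-loop of A: append '11011' or '00000' per character
def cExpand (s : List Char) : List Char :=
  s.foldl (fun answer i =>
    if i = '1' then answer ++ ['1','1','0','1','1'] else answer ++ ['0','0','0','0','0']) []

-- the while loop 'count < n', run n.toNat times (zero times when n ≤ 0)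
def cantorLoop : Nat → List Char → List Char
  | 0, s => s
  | k + 1, s => cantorLoop k (cExpand s)

def cantor (n : Int) : String := String.ofList (cantorLoop n.toNat ['1'])

-- ===== PORT B =====
-- self-similar recursion: base '1'; step p ++ p ++ zeros ++ p ++ p
def cantorRec : Nat → List Char
  | 0 => ['1']
  | k + 1 =>
    let p := cantorRec k
    p ++ p ++ List.replicate (5 ^ k) '0' ++ p ++ p

def cantor_alt (n : Int) : String := String.ofList (cantorRec n.toNat)

-- ===== PRECONDITION & SPEC =====
def Spec_cantor (n : Int) (out : String) : Prop := out = cantor_alt n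
instance (n : Int) (out : String) : Decidable (Spec_cantor n out) := by unfold Spec_cantor; infer_instance

-- ===== CLAIM (what is proved, stated in full; the proofs are below) =====
def Claim_equal_cantor : Prop := ∀ (n : Int), Dom_cantor n → Spec_cantor n (cantor n)

-- ===== LEMMAS AND PROOFS =====

theorem cExpand_foldl (s acc : List Char) :
    s.foldl (fun answer i =>
      if i = '1' then answer ++ ['1','1','0','1','1'] else answer ++ ['0','0','0','0','0']) acc
    = acc ++ cExpand s := by
  induction s generalizing acc with
  | nil => simp [cExpand]
  | cons c t ih =>
    simp only [cExpand, List.foldl_cons]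
    rw [ih, ih (if c = '1' then [] ++ _ else [] ++ _)]
    split_ifs <;> simp

theorem cExpand_append (a b : List Char) :
    cExpand (a ++ b) = cExpand a ++ cExpand b := by
  unfold cExpand
  rw [List.foldl_append, cExpand_foldl, cExpand_foldl b []]
  rfl

theorem cExpand_zeros (m : Nat) :
    cExpand (List.replicate m '0') = List.replicate (5 * m) '0' := by
  induction m with
  | zero => rfl
  | succ k ih =>
    rw [List.replicate_succ, show ('0' :: List.replicate k '0') = ['0'] ++ List.replicate k '0' from rfl,
        cExpand_append, ih]
    have : cExpand ['0'] = List.replicate 5 '0' := by decide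
    rw [this, ← List.replicate_add]
    congr 1
    omega

theorem cExpand_rec (k : Nat) : cExpand (cantorRec k) = cantorRec (k + 1) := by
  induction k with
  | zero => decide
  | succ j ih =>
    show cExpand (cantorRec j ++ cantorRec j ++ List.replicate (5 ^ j) '0'
        ++ cantorRec j ++ cantorRec j) = _
    rw [cExpand_append, cExpand_append, cExpand_append, cExpand_append,
        ih, cExpand_zeros, ← pow_succ']
    rfl

theorem cantorLoop_eq_rec (k : Nat) : cantorLoop k ['1'] = cantorRec k := by
  have h : ∀ (k j : Nat), cantorLoop k (cantorRec j) = cantorRec (j + k) := by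
    intro k
    induction k with
    | zero => intro j; rfl
    | succ m ih =>
      intro j
      show cantorLoop m (cExpand (cantorRec j)) = _
      rw [cExpand_rec, ih]
      congr 1
      omega
  have := h k 0
  simpa using this

theorem cantor_spec : Claim_equal_cantor := by
  intro n _
  show cantor n = cantor_alt n
  unfold cantor cantor_alt
  rw [cantorLoop_eq_rec]
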